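-- pv_equiv track=rewrite | github.com/alias-pyking/InterviewPrep | competitive_programming/cf/uniform_generator.py | get_choice
-- ===== SOURCE A (Python) =====
-- def get_choice(step, mod):
-- 	result = [0] * mod
-- 	calculated = {}
-- 	calculated[0] = 1
-- 	for i in range(1,mod):
-- 		result[i] = (result[i - 1] + step) % mod
-- 		if result[i] in calculated:
-- 			return "Bad Choice"
-- 		calculated[result[i]] = 1
-- 	return "Good Choice"
-- ===== SOURCE B (Python) =====
-- def get_choice(step, mod):
--     # Full-period linear generator test: Good iff gcd(step, mod) == 1,
--     # computed by Euclid's algorithm instead of simulating all mod steps.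
--     if mod <= 1:
--         return "Good Choice"
--     a, b = mod, step % mod
--     while b:
--         a, b = b, a % b
--     return "Good Choice" if a == 1 else "Bad Choice"
-- ===== Notes on version B (the rewrite author's own statement) =====
-- stated objective: faster
-- what changed: Instead of simulating the generator for mod steps with a list and a seen-dict, B decides full period by computing gcd(step, mod) with Euclid's algorithm and returns Good iff it is 1.
import Mathlib
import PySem

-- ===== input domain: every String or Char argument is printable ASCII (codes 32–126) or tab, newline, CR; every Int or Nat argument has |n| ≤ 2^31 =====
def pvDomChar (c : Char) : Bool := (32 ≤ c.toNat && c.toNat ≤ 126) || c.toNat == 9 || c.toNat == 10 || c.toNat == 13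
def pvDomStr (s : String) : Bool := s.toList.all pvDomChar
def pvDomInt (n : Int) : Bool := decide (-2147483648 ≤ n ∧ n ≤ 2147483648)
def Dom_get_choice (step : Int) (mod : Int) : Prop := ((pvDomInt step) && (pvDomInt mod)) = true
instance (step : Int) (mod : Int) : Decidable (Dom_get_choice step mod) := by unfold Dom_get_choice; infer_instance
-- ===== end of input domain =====

-- B replaces A's O(mod) simulation of the generator by Euclid's gcd: Good iff gcd(step, mod) = 1.


-- ===== PORT A =====
-- the for-loop over range(1, mod), carrying the result list and the seen-dict.
-- Python's list is ported as Array Int and its dict as Std.HashMap Int Int (same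
-- contents, insert/contains semantics and O(1) cost as CPython's list/dict; the
-- indices i and i-1 are always in range when the loop body runs, so the total
-- getD/setIfInBounds are exact here).
def aLoop (step m : Int) : Array Int → Std.HashMap Int Int → List Int → String
  | _, _, [] => "Good Choice"
  | result, calcd, i :: rest =>
    let v := PySem.Int.mod (result.getD (i - 1).toNat 0 + step) m
    let result' := result.setIfInBounds i.toNat v
    if calcd.contains v then "Bad Choice"
    else aLoop step m result' (calcd.insert v 1) rest

def get_choice (step : Int) (mod : Int) : String :=
  aLoop step mod (Array.replicate mod.toNat 0)
    ((∅ : Std.HashMap Int Int).insert 0 1) (PySem.List.pyRange 1 mod 1)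

-- ===== PORT B =====
-- while b: a, b = b, a % b
def euclid (a b : Int) : Int :=
  if h : b = 0 then a else euclid b (PySem.Int.mod a b)
termination_by b.natAbs
decreasing_by
  rcases lt_or_gt_of_ne h with hb | hb
  · have := PySem.Int.mod_neg_bounds a hb; omega
  · have h1 := PySem.Int.mod_nonneg a hb
    have h2 := PySem.Int.mod_lt a hb; omega

def get_choice_alt (step : Int) (mod : Int) : String :=
  if mod ≤ 1 then "Good Choice"
  else if euclid mod (PySem.Int.mod step mod) = 1 then "Good Choice" else "Bad Choice"

-- ===== PRECONDITION & SPEC =====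
def Spec_get_choice (step : Int) (mod : Int) (out : String) : Prop := out = get_choice_alt step mod
instance (step : Int) (mod : Int) (out : String) : Decidable (Spec_get_choice step mod out) := by unfold Spec_get_choice; infer_instance

-- ===== CLAIM (what is proved, stated in full; the proofs are below) =====
def Claim_equal_get_choice : Prop := ∀ (step : Int) (mod : Int), Dom_get_choice step mod → Spec_get_choice step mod (get_choice step mod)

-- ===== LEMMAS AND PROOFS =====

-- if gcd(step, m) = 1 the residues j*step % m are pairwise distinct below m
theorem pv_inj_of_coprime (step m : Int) (hg : Int.gcd step m = 1)
    (j k : Nat) (hj : (j : Int) < m) (hk : (k : Int) < m)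
    (h : ((j : Int) * step) % m = ((k : Int) * step) % m) : j = k := by
  have hco : IsCoprime m step := by
    rw [Int.isCoprime_iff_gcd_eq_one, Int.gcd_comm]; exact hg
  have hdvd : m ∣ ((j : Int) - k) * step := by
    have := Int.emod_eq_emod_iff_emod_sub_eq_zero.mp h
    have h2 : ((j : Int) * step - (k : Int) * step) = ((j : Int) - k) * step := by ring
    rw [h2] at this
    exact Int.dvd_of_emod_eq_zero this
  have hd2 : m ∣ ((j : Int) - k) := hco.dvd_of_dvd_mul_right hdvd
  have hz : ((j : Int) - k) = 0 := Int.eq_zero_of_abs_lt_dvd hd2 (by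
    rw [abs_lt]; omega)
  omega

-- if gcd(step, m) ≠ 1 there is a collision d*step ≡ 0 (mod m) with 0 < d < m
theorem pv_collision_of_not_coprime (step m : Int) (hm : 2 ≤ m) (hg : Int.gcd step m ≠ 1) :
    ∃ d : Nat, 0 < d ∧ (d : Int) < m ∧ ((d : Int) * step) % m = 0 := by
  set g : Nat := Int.gcd step m with hgdef
  have hg0 : g ≠ 0 := by
    intro h0
    rcases Int.gcd_eq_zero_iff.mp h0 with ⟨_, h2⟩
    omega
  have hg2 : 2 ≤ g := by omega
  have hgm : (g : Int) ∣ m := Int.gcd_dvd_right step m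
  have hgs : (g : Int) ∣ step := Int.gcd_dvd_left step m
  have hgmn : g ∣ m.toNat := by
    have : (g : Int) ∣ (m.toNat : Int) := by
      rwa [Int.toNat_of_nonneg (by omega)]
    exact_mod_cast this
  refine ⟨m.toNat / g, ?_, ?_, ?_⟩
  · exact Nat.div_pos (Nat.le_of_dvd (by omega) hgmn) (by omega)
  · have := Nat.div_lt_self (n := m.toNat) (by omega) hg2
    omega
  · apply Int.emod_eq_zero_of_dvd
    rcases hgs with ⟨s', hs'⟩
    have hmd : (((m.toNat / g) * g : Nat) : Int) = m := by
      rw [Nat.div_mul_cancel hgmn, Int.toNat_of_nonneg (by omega)]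
    refine ⟨s', ?_⟩
    calc ((m.toNat / g : Nat) : Int) * step
        = ((m.toNat / g : Nat) : Int) * ((g : Int) * s') := by rw [hs']
      _ = (((m.toNat / g) * g : Nat) : Int) * s' := by push_cast; ring
      _ = m * s' := by rw [hmd]

theorem pv_gcd_one_of_inj (step m : Int) (hm : 2 ≤ m)
    (hinj : ∀ j k : Nat, j < m.toNat → k < m.toNat →
      ((j : Int) * step) % m = ((k : Int) * step) % m → j = k) :
    Int.gcd step m = 1 := by
  by_contra hg
  obtain ⟨d, hd0, hdm, hcol⟩ := pv_collision_of_not_coprime step m hm hg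
  have h0 : ((0 : Nat) : Int) * step % m = 0 := by simp
  have := hinj d 0 (by omega) (by omega) (by rw [hcol, h0])
  omega

-- Array.getD read through toList
theorem pv_array_getD (a : Array Int) (i : Nat) (d : Int) : a.getD i d = a.toList.getD i d := by
  rw [Array.getD_eq_getD_getElem?, List.getD_eq_getElem?_getD, Array.getElem?_toList]

-- the updated result list is the next stage of the residue table
theorem pv_set_map_range (n t : Nat) (f : Nat → Int) :
    ((List.range n).map (fun j => if j < t then f j else 0)).set t (f t) =
      (List.range n).map (fun j => if j < t + 1 then f j else 0) := by
  apply List.ext_getElem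
  · simp
  · intro i h1 h2
    simp only [List.getElem_set, List.getElem_map, List.getElem_range,
      List.length_set, List.length_map, List.length_range] at h1 h2 ⊢
    by_cases hti : t = i
    · subst hti; rw [if_pos rfl, if_pos (by omega)]
    · rw [if_neg hti]
      by_cases hit : i < t
      · rw [if_pos hit, if_pos (by omega)]
      · rw [if_neg hit, if_neg (by omega)]

-- main loop invariant: A's loop from index t decides coprimality
theorem pv_aLoop_eq (step m : Int) (hm : 2 ≤ m) :
    ∀ (fuel t : Nat) (result : Array Int) (calcd : Std.HashMap Int Int),
    fuel = m.toNat - t → 1 ≤ t → t ≤ m.toNat →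
    result.toList = (List.range m.toNat).map (fun j => if j < t then ((j : Int) * step) % m else 0) →
    (∀ x, calcd.contains x = true ↔ ∃ j, j < t ∧ ((j : Int) * step) % m = x) →
    (∀ j k : Nat, j < t → k < t →
      ((j : Int) * step) % m = ((k : Int) * step) % m → j = k) →
    aLoop step m result calcd (PySem.List.pyRange (t : Int) m 1) =
      if Int.gcd step m = 1 then "Good Choice" else "Bad Choice" := by
  intro fuel
  induction fuel with
  | zero =>
    intro t result calcd hfuel ht1 htm hres hcal hinj
    have htm' : t = m.toNat := by omega
    rw [PySem.List.pyRange_one_eq_nil (by omega)]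
    rw [if_pos (pv_gcd_one_of_inj step m hm (by rw [← htm'] at *; exact hinj))]
    rfl
  | succ fuel ih =>
    intro t result calcd hfuel ht1 htm hres hcal hinj
    by_cases htlt : t < m.toNat
    · have htm2 : (t : Int) < m := by omega
      rw [PySem.List.pyRange_one_cons htm2]
      show (let v := PySem.Int.mod (result.getD ((t : Int) - 1).toNat 0 + step) m
            let result' := result.setIfInBounds (t : Int).toNat v
            if calcd.contains v then "Bad Choice"
            else aLoop step m result' (calcd.insert v 1) (PySem.List.pyRange ((t : Int) + 1) m 1)) = _
      have hget : result.getD ((t : Int) - 1).toNat 0 = (((t - 1 : Nat) : Int) * step) % m := by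
        have hc : ((t : Int) - 1).toNat = t - 1 := by omega
        rw [hc, pv_array_getD, hres,
          PySem.List.getD_map_range _ _ _ _ (by omega), if_pos (by omega)]
      have hv : PySem.Int.mod (result.getD ((t : Int) - 1).toNat 0 + step) m =
          ((t : Int) * step) % m := by
        rw [hget, PySem.Int.mod_eq_emod_of_pos (by omega), Int.emod_add_emod]
        congr 1
        have : ((t - 1 : Nat) : Int) = (t : Int) - 1 := by omega
        rw [this]; ring
      simp only [hv]
      by_cases hc : calcd.contains (((t : Int) * step) % m)
      · rw [if_pos hc]
        obtain ⟨j, hjt, hjv⟩ := (hcal _).mp hc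
        rw [if_neg]
        intro hg1
        have := pv_inj_of_coprime step m hg1 j t (by omega) (by omega) hjv
        omega
      · rw [if_neg hc]
        have hcast : ((t : Int) + 1) = ((t + 1 : Nat) : Int) := by omega
        rw [hcast]
        apply ih (t + 1)
        · omega
        · omega
        · omega
        · rw [Array.toList_setIfInBounds, Int.toNat_natCast, hres, pv_set_map_range _ _ _]
        · intro x
          rw [Std.HashMap.contains_insert]
          simp only [Bool.or_eq_true, beq_iff_eq]
          constructor
          · intro hx
            rcases hx with hx | hx
            · exact ⟨t, by omega, hx⟩
            · obtain ⟨j, hj, hje⟩ := (hcal x).mp hx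
              exact ⟨j, by omega, hje⟩
          · rintro ⟨j, hj, hje⟩
            by_cases hjt : j < t
            · exact Or.inr ((hcal x).mpr ⟨j, hjt, hje⟩)
            · have : j = t := by omega
              subst this
              exact Or.inl hje
        · intro j k hj hk hjk
          by_cases hjt : j < t <;> by_cases hkt : k < t
          · exact hinj j k hjt hkt hjk
          · exfalso
            have hkt' : k = t := by omega
            subst hkt'
            exact hc ((hcal _).mpr ⟨j, hjt, hjk⟩)
          · exfalso
            have hjt' : j = t := by omega
            subst hjt'
            exact hc ((hcal _).mpr ⟨k, hkt, hjk.symm⟩)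
          · omega
    · have htm' : t = m.toNat := by omega
      rw [PySem.List.pyRange_one_eq_nil (by omega)]
      rw [if_pos (pv_gcd_one_of_inj step m hm (by rw [← htm'] at *; exact hinj))]
      rfl

-- A computes the gcd criterion when mod ≥ 2
theorem pv_get_choice_eq_gcd (step m : Int) (hm : 2 ≤ m) :
    get_choice step m = if Int.gcd step m = 1 then "Good Choice" else "Bad Choice" := by
  unfold get_choice
  have h1 : ((1 : Nat) : Int) = (1 : Int) := by norm_num
  rw [← h1]
  apply pv_aLoop_eq step m hm (m.toNat - 1) 1
  · rfl
  · omega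
  · omega
  · rw [Array.toList_replicate]
    apply List.ext_getElem
    · simp
    · intro i hi1 hi2
      simp only [List.getElem_replicate, List.getElem_map, List.getElem_range]
      split_ifs with h
      · have : i = 0 := by omega
        subst this; simp
      · rfl
  · intro x
    rw [Std.HashMap.contains_insert]
    simp only [Std.HashMap.contains_empty, Bool.or_false, beq_iff_eq]
    constructor
    · intro h; exact ⟨0, by omega, by simp [← h]⟩
    · rintro ⟨j, hj, hje⟩
      have : j = 0 := by omega
      subst this; simpa using hje
  · intro j k hj hk _; omega

-- B's Euclid loop computes Nat.gcd
theorem pv_euclid_eq (y : Nat) : ∀ x : Nat, euclid (x : Int) (y : Int) = (Nat.gcd y x : Int) := by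
  induction y using Nat.strong_induction_on with
  | _ y ih =>
    intro x
    match hy : y with
    | 0 => rw [euclid]; simp
    | Nat.succ n =>
      rw [euclid]
      rw [dif_neg (by exact_mod_cast Nat.succ_ne_zero n)]
      have hpos : (0 : Int) < (Nat.succ n : Int) := by exact_mod_cast Nat.succ_pos n
      rw [PySem.Int.mod_eq_emod_of_pos hpos]
      have hmodcast : (x : Int) % (Nat.succ n : Int) = ((x % Nat.succ n : Nat) : Int) := by
        push_cast; rfl
      rw [hmodcast, ih (x % Nat.succ n) (Nat.mod_lt x (Nat.succ_pos n)) (Nat.succ n),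
        Nat.gcd_rec (Nat.succ n) x]

-- B computes the gcd criterion when mod ≥ 2
theorem pv_get_choice_alt_eq_gcd (step m : Int) (hm : 2 ≤ m) :
    get_choice_alt step m = if Int.gcd step m = 1 then "Good Choice" else "Bad Choice" := by
  unfold get_choice_alt
  rw [if_neg (by omega)]
  obtain ⟨x, hx⟩ : ∃ x : Nat, ((x : Nat) : Int) = m := ⟨m.toNat, Int.toNat_of_nonneg (by omega)⟩
  subst hx
  have hmod : PySem.Int.mod step (x : Int) = step % (x : Int) :=
    PySem.Int.mod_eq_emod_of_pos (by omega)
  have hym : (0 : Int) ≤ step % (x : Int) := Int.emod_nonneg step (by omega)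
  obtain ⟨y, hy⟩ : ∃ y : Nat, ((y : Nat) : Int) = step % (x : Int) :=
    ⟨(step % (x : Int)).toNat, Int.toNat_of_nonneg hym⟩
  have heu : euclid (x : Int) (PySem.Int.mod step (x : Int)) = (Nat.gcd y x : Int) := by
    rw [hmod, ← hy, pv_euclid_eq]
  have hgg : Nat.gcd y x = Int.gcd step (x : Int) := by
    have h1 : Nat.gcd y x = Int.gcd (step % (x : Int)) (x : Int) := by
      unfold Int.gcd
      congr 1 <;> omega
    rw [h1, Int.gcd_comm]
    have h2 : step % (x : Int) = step + (-(step / (x : Int))) * (x : Int) := by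
      rw [Int.emod_def]; ring
    rw [h2, Int.gcd_add_mul_right_right, Int.gcd_comm]
  rw [heu, hgg]
  split_ifs with h1 h2 h3
  · rfl
  · exfalso; exact h2 (by exact_mod_cast h1)
  · exfalso; exact h1 (by exact_mod_cast h3)
  · rfl

-- ===== VERDICT (by name: the statement is the Claim_ definition above) =====
theorem get_choice_spec : Claim_equal_get_choice := by
  intro step mod _
  unfold Spec_get_choice
  by_cases hm : mod ≤ 1
  · unfold get_choice get_choice_alt
    rw [PySem.List.pyRange_one_eq_nil hm, if_pos hm]
    rfl
  · rw [pv_get_choice_eq_gcd step mod (by omega),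
      pv_get_choice_alt_eq_gcd step mod (by omega)]
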